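-- pv_equiv track=rewrite | github.com/MrBrantCode/unitest_baseline | mut_generate/mist_train_cf/cf_64992/solution.py | sort_complex_lists
-- ===== SOURCE A (Python) =====
-- def sort_complex_lists(list1, list2):
--     list1.sort(key=lambda x: abs(x))
--     list2.sort(key=lambda x: abs(x))
--
--     merged_list = []
--     i = j = 0
--
--     while i < len(list1) and j < len(list2):
--         if abs(list1[i]) < abs(list2[j]):
--             merged_list.append(list1[i])
--             i += 1
--         else:
--             merged_list.append(list2[j])
--             j += 1
--
--     while i < len(list1):
--         merged_list.append(list1[i])
--         i += 1
--
--     while j < len(list2):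
--         merged_list.append(list2[j])
--         j += 1
--
--     return merged_list
-- ===== SOURCE B (Python) =====
-- def sort_complex_lists(list1, list2):
--     list1.sort(key=abs)
--     list2.sort(key=abs)
--     return sorted(list2 + list1, key=abs)
-- ===== Notes on version B (the rewrite author's own statement) =====
-- stated objective: simpler
-- what changed: The hand-written two-pointer merge of the two abs-sorted lists is replaced by a single stable re-sort of list2 + list1 by abs (stability reproduces the merge's tie-break: equal-abs elements of list2 come first); the in-place sorts of both arguments are kept.
import Mathlib
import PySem

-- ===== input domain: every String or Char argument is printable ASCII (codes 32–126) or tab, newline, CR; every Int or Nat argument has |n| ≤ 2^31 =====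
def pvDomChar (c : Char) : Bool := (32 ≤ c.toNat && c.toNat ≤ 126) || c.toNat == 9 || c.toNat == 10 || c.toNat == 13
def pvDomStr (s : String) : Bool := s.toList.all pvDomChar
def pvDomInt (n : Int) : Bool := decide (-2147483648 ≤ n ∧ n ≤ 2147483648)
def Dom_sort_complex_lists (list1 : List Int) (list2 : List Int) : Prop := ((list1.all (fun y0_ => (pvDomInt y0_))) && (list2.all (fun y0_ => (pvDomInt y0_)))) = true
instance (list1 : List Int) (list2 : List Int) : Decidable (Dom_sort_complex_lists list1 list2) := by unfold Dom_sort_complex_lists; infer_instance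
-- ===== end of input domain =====

-- B replaces A's hand-written two-pointer merge of the two abs-sorted lists by a single
-- stable re-sort of list2 ++ list1 by abs (objective: simpler). Both versions sort their
-- list arguments in place in Python; the equivalence proved here is about the return value.

-- ===== PORT A =====
-- the two while-loops of A's merge, as the obvious structural recursion on the two pointers' suffixes
def mergeAbs : List Int → List Int → List Int
  | [], ys => ys
  | x :: xs, [] => x :: mergeAbs xs []
  | x :: xs, y :: ys =>
      if x.natAbs < y.natAbs then x :: mergeAbs xs (y :: ys)
      else y :: mergeAbs (x :: xs) ys

def sort_complex_lists (list1 : List Int) (list2 : List Int) : List Int :=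
  let l1 := PySem.List.sorted list1 (fun x => x.natAbs)   -- list1.sort(key=lambda x: abs(x))
  let l2 := PySem.List.sorted list2 (fun x => x.natAbs)   -- list2.sort(key=lambda x: abs(x))
  mergeAbs l1 l2

-- ===== PORT B =====
def sort_complex_lists_alt (list1 : List Int) (list2 : List Int) : List Int :=
  let l1 := PySem.List.sorted list1 (fun x => x.natAbs)   -- list1.sort(key=abs)
  let l2 := PySem.List.sorted list2 (fun x => x.natAbs)   -- list2.sort(key=abs)
  PySem.List.sorted (l2 ++ l1) (fun x => x.natAbs)        -- sorted(list2 + list1, key=abs)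

-- ===== PRECONDITION & SPEC =====
def Spec_sort_complex_lists (list1 : List Int) (list2 : List Int) (out : List Int) : Prop := out = sort_complex_lists_alt list1 list2
instance (list1 : List Int) (list2 : List Int) (out : List Int) : Decidable (Spec_sort_complex_lists list1 list2 out) := by unfold Spec_sort_complex_lists; infer_instance

-- ===== CLAIM (what is proved, stated in full; the proofs are below) =====
def Claim_equal_sort_complex_lists : Prop := ∀ (list1 : List Int) (list2 : List Int), Dom_sort_complex_lists list1 list2 → Spec_sort_complex_lists list1 list2 (sort_complex_lists list1 list2)

-- ===== LEMMAS AND PROOFS =====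

-- If every element of a has key ≥ key x, the merge emits x first.
theorem mergeAbs_cons_right (a d : List Int) (x : Int)
    (h : ∀ z ∈ a, ¬ z.natAbs < x.natAbs) :
    mergeAbs a (x :: d) = x :: mergeAbs a d := by
  cases a with
  | nil => simp [mergeAbs]
  | cons z a' =>
      have hz := h z (by simp)
      simp [mergeAbs, hz]

-- insertBy preserves key-sortedness.
theorem insertBy_pairwise (x : Int) (b : List Int)
    (hb : b.Pairwise (fun a c : Int => a.natAbs ≤ c.natAbs)) :
    (PySem.List.insertBy (fun a c : Int => decide (a.natAbs < c.natAbs)) x b).Pairwise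
      (fun a c : Int => a.natAbs ≤ c.natAbs) := by
  induction b with
  | nil => simp [PySem.List.insertBy]
  | cons y b' ih =>
      rcases List.pairwise_cons.mp hb with ⟨hy, hb'⟩
      by_cases hxy : x.natAbs < y.natAbs
      · simp only [PySem.List.insertBy, hxy, decide_true, if_true]
        refine List.pairwise_cons.mpr ⟨?_, hb⟩
        intro c hc
        rcases List.mem_cons.mp hc with rfl | hc
        · exact Nat.le_of_lt hxy
        · exact Nat.le_trans (Nat.le_of_lt hxy) (hy c hc)
      · simp only [PySem.List.insertBy, hxy, decide_false, Bool.false_eq_true, if_false]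
        refine List.pairwise_cons.mpr ⟨?_, ih hb'⟩
        intro c hc
        rcases (PySem.List.mem_insertBy _ _ _ _).mp hc with hc | hc
        · exact hc ▸ Nat.le_of_not_lt hxy
        · exact hy c hc

-- Inserting x into sorted b, then merging the remaining (≥ x) tail a', is one step of A's merge.
theorem merge_insert (b : List Int) (x : Int) (a' : List Int)
    (hx : ∀ z ∈ a', ¬ z.natAbs < x.natAbs)
    (hb : b.Pairwise (fun a c : Int => a.natAbs ≤ c.natAbs)) :
    mergeAbs a' (PySem.List.insertBy (fun a c : Int => decide (a.natAbs < c.natAbs)) x b)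
      = mergeAbs (x :: a') b := by
  induction b with
  | nil =>
      simp only [PySem.List.insertBy]
      rw [mergeAbs_cons_right a' [] x hx]
      cases a' <;> simp [mergeAbs]
  | cons y b' ih =>
      rcases List.pairwise_cons.mp hb with ⟨hy, hb'⟩
      by_cases hxy : x.natAbs < y.natAbs
      · simp only [PySem.List.insertBy, hxy, decide_true, if_true]
        rw [mergeAbs_cons_right a' (y :: b') x hx]
        simp [mergeAbs, hxy]
      · have hay : ∀ z ∈ a', ¬ z.natAbs < y.natAbs := by
          intro z hz hlt
          exact hx z hz (Nat.lt_of_lt_of_le hlt (Nat.le_of_not_lt hxy))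
        simp only [PySem.List.insertBy, hxy, decide_false, Bool.false_eq_true, if_false]
        rw [mergeAbs_cons_right a' _ y hay, ih hb']
        simp [mergeAbs, hxy]

-- Folding stable insertion of a sorted list a into a sorted list b is A's merge.
theorem foldl_insert_eq_merge (a : List Int)
    (ha : a.Pairwise (fun p q : Int => p.natAbs ≤ q.natAbs)) :
    ∀ b : List Int, b.Pairwise (fun p q : Int => p.natAbs ≤ q.natAbs) →
      a.foldl (fun acc x => PySem.List.insertBy (fun p q : Int => decide (p.natAbs < q.natAbs)) x acc) b
        = mergeAbs a b := by
  induction a with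
  | nil => intro b _; simp [mergeAbs]
  | cons x a' ih =>
      intro b hb
      rcases List.pairwise_cons.mp ha with ⟨hx, ha'⟩
      simp only [List.foldl_cons]
      rw [ih ha' _ (insertBy_pairwise x b hb)]
      exact merge_insert b x a' (fun z hz hlt => Nat.lt_irrefl _ (Nat.lt_of_lt_of_le hlt (hx z hz))) hb

-- ===== VERDICT (by name: the statement is the Claim_ definition above) =====
theorem sort_complex_lists_spec : Claim_equal_sort_complex_lists := by
  intro list1 list2 _
  unfold Spec_sort_complex_lists sort_complex_lists sort_complex_lists_alt
  set l1 := PySem.List.sorted list1 (fun x => x.natAbs) with hl1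
  set l2 := PySem.List.sorted list2 (fun x => x.natAbs) with hl2
  have h1 : l1.Pairwise (fun p q : Int => p.natAbs ≤ q.natAbs) :=
    PySem.List.sorted_pairwise list1 (fun x => x.natAbs)
  have h2 : l2.Pairwise (fun p q : Int => p.natAbs ≤ q.natAbs) :=
    PySem.List.sorted_pairwise list2 (fun x => x.natAbs)
  rw [PySem.List.sorted_eq_foldl_insertBy, List.foldl_append]
  rw [show (List.foldl (fun acc x => PySem.List.insertBy (fun p q : Int => decide (p.natAbs < q.natAbs)) x acc) [] l2) = l2 from by
    rw [← PySem.List.sorted_eq_foldl_insertBy]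
    exact PySem.List.sorted_eq_self_of_pairwise l2 _ h2]
  exact (foldl_insert_eq_merge l1 h1 l2 h2).symm
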